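-- pv_equiv track=rewrite | github.com/Offblink/Vibe-Coding | 整除关系偏序图生成器.py | compute_direct_edges_optimized
-- ===== SOURCE A (Python) =====
-- from typing import List, Dict, Set, Tuple
--
-- def compute_direct_edges_optimized(numbers: List[int]) -> List[Tuple[int, int]]:
--     """优化的直接整除关系计算"""
--     edges = []
--     num_set = set(numbers)
--
--     for i, a in enumerate(numbers):
--         # 只检查a的倍数
--         for multiple in range(2 * a, numbers[-1] + 1, a):
--             if multiple in num_set:
--                 # 检查是否直接关系
--                 is_direct = True
--                 for b in numbers:
--                     if a < b < multiple and multiple % b == 0 and b % a == 0: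
--                         is_direct = False
--                         break
--                 if is_direct:
--                     edges.append((a, multiple))
--
--     return edges
-- ===== SOURCE B (Python) =====
-- def _has_present_proper_divisor(k, a, num_set):
--     """Is some proper divisor chain element a*d (1 < d < k, d | k) present?
--     Enumerates divisors of k in pairs up to sqrt(k)."""
--     d = 2
--     while d * d <= k:
--         if k % d == 0:
--             if a * d in num_set or a * (k // d) in num_set:
--                 return True
--         d += 1
--     return False
--
--
-- def compute_direct_edges_optimized(numbers):
--     """Direct-divisibility (Hasse) edges: a candidate edge a -> m = a*k is direct
--     unless some intermediate a*d with d a proper divisor of k is present; that is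
--     decided by enumerating divisors of the quotient k up to sqrt(k) against the
--     value set, instead of rescanning the whole input list per candidate."""
--     if not numbers:
--         return []
--     num_set = set(numbers)
--     last = numbers[-1]
--     edges = []
--     for a in numbers:
--         for m in range(2 * a, last + 1, a):
--             if m in num_set:
--                 k = m // a
--                 if not _has_present_proper_divisor(k, a, num_set):
--                     edges.append((a, m))
--     return edges
-- ===== Notes on version B (the rewrite author's own statement) =====
-- stated objective: faster
-- what changed: The per-candidate directness test enumerates divisors of the quotient k = m//a up to sqrt(k) against the value set instead of rescanning the whole input list; Pre_ excludes lists containing zero (A raises ValueError from a zero range step, B likewise) and lists where a negative entry a reaches another entry m via its descending range of multiples bounded by the last element — a corner where A's blocker test 'a < b < multiple' is vacuous by direction, so which edges get pruned there is an accident of either traversal.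
-- outside the precondition, e.g. on compute_direct_edges_optimized([-2, -4, -8, -16]): A returns [(-2, -4), (-2, -8), (-4, -8)], B returns [(-2, -4), (-4, -8)]
import Mathlib
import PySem

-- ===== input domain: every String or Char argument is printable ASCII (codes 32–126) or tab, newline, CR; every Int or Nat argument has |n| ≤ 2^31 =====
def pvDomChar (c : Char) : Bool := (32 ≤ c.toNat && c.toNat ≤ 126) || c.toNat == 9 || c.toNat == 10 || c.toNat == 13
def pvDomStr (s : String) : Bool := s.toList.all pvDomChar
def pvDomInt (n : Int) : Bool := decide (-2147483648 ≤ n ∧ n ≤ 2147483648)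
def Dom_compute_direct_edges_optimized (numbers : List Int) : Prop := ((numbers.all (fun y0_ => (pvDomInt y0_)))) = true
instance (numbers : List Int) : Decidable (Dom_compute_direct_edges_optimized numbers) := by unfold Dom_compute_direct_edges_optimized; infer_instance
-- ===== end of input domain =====

-- B decides directness of a candidate edge a -> m by enumerating divisors of the
-- quotient k = m // a up to sqrt(k) against the value set, instead of rescanning
-- the whole input list per candidate (objective: faster).

-- ===== PORT A =====
-- the break-out flag loop 'for b in numbers: … is_direct = False; break'
def pvIsDirectA (a m : Int) : List Int → Bool
  | [] => true
  | b :: rest =>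
      if a < b ∧ b < m ∧ PySem.Int.mod m b = 0 ∧ PySem.Int.mod b a = 0 then false
      else pvIsDirectA a m rest

def compute_direct_edges_optimized (numbers : List Int) : List (Int × Int) :=
  let num_set : PySem.Set Int := PySem.Set.ofList numbers
  (PySem.List.enumerate numbers 0).foldl (fun edges ia =>
    let a := ia.2
    (PySem.List.pyRange (2 * a) ((PySem.List.pyGet? numbers (-1)).getD 0 + 1) a).foldl
      (fun edges multiple =>
        if num_set.contains multiple then
          if pvIsDirectA a multiple numbers then edges ++ [(a, multiple)] else edges
        else edges) edges) []

-- ===== PORT B =====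
-- the while loop of _has_present_proper_divisor: d counts up while d*d <= k
def pvHasPPD (a k : Int) (s : PySem.Set Int) (d : Int) : Bool :=
  if h : d * d ≤ k then
    if PySem.Int.mod k d = 0 ∧
        (s.contains (a * d) = true ∨ s.contains (a * PySem.Int.floordiv k d) = true)
    then true
    else pvHasPPD a k s (d + 1)
  else false
termination_by (k + 1 - d).toNat
decreasing_by
  have hd : d ≤ d * d := by nlinarith [mul_self_nonneg d, mul_self_nonneg (d - 1)]
  omega

def compute_direct_edges_optimized_alt (numbers : List Int) : List (Int × Int) :=
  if numbers = [] then [] else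
  let num_set : PySem.Set Int := PySem.Set.ofList numbers
  let last := (PySem.List.pyGet? numbers (-1)).getD 0
  numbers.foldl (fun edges a =>
    (PySem.List.pyRange (2 * a) (last + 1) a).foldl (fun edges m =>
      if num_set.contains m then
        let k := PySem.Int.floordiv m a
        if pvHasPPD a k num_set 2 then edges else edges ++ [(a, m)]
      else edges) edges) []

-- ===== PRECONDITION & SPEC =====
-- Pre_ excludes lists containing 0, on which A raises ValueError (range step 0; B
-- raises too), and lists where some negative entry a reaches another entry m via the
-- descending range(2*a, numbers[-1]+1, a) — a corner of the divisibility ordering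
-- where A's blocker test 'a < b < multiple' is vacuous by direction (multiple < a),
-- so which edges get pruned is an accident of the traversal in either program.
def Pre_compute_direct_edges_optimized (numbers : List Int) : Prop :=
  (0 : Int) ∉ numbers ∧
    ∀ a ∈ numbers, a < 0 → ∀ m ∈ numbers,
      ¬(m ≤ 2 * a ∧ (PySem.List.pyGet? numbers (-1)).getD 0 + 1 < m ∧ a ∣ m)
instance (numbers : List Int) : Decidable (Pre_compute_direct_edges_optimized numbers) := by unfold Pre_compute_direct_edges_optimized; infer_instance
def pvWitness_compute_direct_edges_optimized : List Int := [1, 2, 4, 6, 12]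

def Spec_compute_direct_edges_optimized (numbers : List Int) (out : List (Int × Int)) : Prop := out = compute_direct_edges_optimized_alt numbers
instance (numbers : List Int) (out : List (Int × Int)) : Decidable (Spec_compute_direct_edges_optimized numbers out) := by unfold Spec_compute_direct_edges_optimized; infer_instance

-- ===== CLAIM (what is proved, stated in full; the proofs are below) =====
def Claim_equal_compute_direct_edges_optimized : Prop := ∀ (numbers : List Int), Dom_compute_direct_edges_optimized numbers → Pre_compute_direct_edges_optimized numbers → Spec_compute_direct_edges_optimized numbers (compute_direct_edges_optimized numbers)

-- ===== LEMMAS AND PROOFS =====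

theorem pvIsDirectA_eq_not_any (a m : Int) (l : List Int) :
    pvIsDirectA a m l =
      !l.any (fun b => decide (a < b ∧ b < m ∧ PySem.Int.mod m b = 0 ∧ PySem.Int.mod b a = 0)) := by
  induction l with
  | nil => rfl
  | cons b rest ih =>
      simp only [pvIsDirectA, List.any_cons]
      by_cases h : a < b ∧ b < m ∧ PySem.Int.mod m b = 0 ∧ PySem.Int.mod b a = 0
      · simp [h]
      · simp [h, ih]

theorem pvHasPPD_iff (a k : Int) (s : PySem.Set Int) (d0 : Int) :
    0 ≤ d0 →
    (pvHasPPD a k s d0 = true ↔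
      ∃ d, d0 ≤ d ∧ d * d ≤ k ∧ PySem.Int.mod k d = 0 ∧
        (s.contains (a * d) = true ∨ s.contains (a * PySem.Int.floordiv k d) = true)) := by
  induction d0 using pvHasPPD.induct (a := a) (k := k) (s := s) with
  | case1 d0 h hc =>
      intro _
      rw [pvHasPPD, dif_pos h, if_pos hc]
      exact ⟨fun _ => ⟨d0, le_refl _, h, hc.1, hc.2⟩, fun _ => rfl⟩
  | case2 d0 h hc ih =>
      intro hd0
      rw [pvHasPPD, dif_pos h, if_neg hc]
      rw [ih (by omega)]
      constructor
      · rintro ⟨d, h1, h2, h3, h4⟩; exact ⟨d, by omega, h2, h3, h4⟩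
      · rintro ⟨d, h1, h2, h3, h4⟩
        refine ⟨d, ?_, h2, h3, h4⟩
        rcases eq_or_lt_of_le h1 with rfl | hlt
        · exact absurd ⟨h3, h4⟩ hc
        · omega
  | case3 d0 h =>
      intro hd0
      rw [pvHasPPD, dif_neg h]
      simp only [Bool.false_eq_true, false_iff]
      rintro ⟨d, h1, h2, _, _⟩
      exact h (by nlinarith)

-- m = a*k in hand: A's whole-list blocker scan finds a blocker iff some proper
-- divisor pair of k has its multiple of a in the set
theorem pvBlock (numbers : List Int) (a m : Int) (ha : 0 < a)
    (hmod : PySem.Int.mod m a = 0) (hk2 : 2 ≤ PySem.Int.floordiv m a) :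
    pvIsDirectA a m numbers
      = !pvHasPPD a (PySem.Int.floordiv m a) (PySem.Set.ofList numbers) 2 := by
  rw [pvIsDirectA_eq_not_any]
  congr 1
  apply Bool.eq_iff_iff.mpr
  rw [List.any_eq_true, pvHasPPD_iff _ _ _ _ (by omega)]
  set k := PySem.Int.floordiv m a with hk
  have hm : m = a * k := by
    have := PySem.Int.floordiv_mul_add_mod m a
    rw [← hk] at this; rw [hmod] at this; linarith
  have hk0 : 0 < k := by omega
  have hcontains : ∀ x : Int, (PySem.Set.ofList numbers).contains x = true ↔ x ∈ numbers := by
    intro x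
    rw [PySem.Set.contains]
    simp [PySem.Set.mem_ofList]
  constructor
  · rintro ⟨b, hb, hcond⟩
    rw [decide_eq_true_eq] at hcond
    obtain ⟨hab, hbm, hmb, hba⟩ := hcond
    obtain ⟨t, rfl⟩ : a ∣ b := (PySem.Int.mod_eq_zero_iff_dvd _ _).1 hba
    have ht1 : 1 < t := by nlinarith
    have htk : t < k := by rw [hm] at hbm; nlinarith
    have htdvd : t ∣ k := by
      have hdvd : a * t ∣ a * k := by rw [← hm]; exact (PySem.Int.mod_eq_zero_iff_dvd _ _).1 hmb
      exact (mul_dvd_mul_iff_left (by omega : a ≠ 0)).1 hdvd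
    obtain ⟨u, hu⟩ := htdvd
    have hu0 : 0 < u := by nlinarith
    by_cases hsq : t * t ≤ k
    · refine ⟨t, by omega, hsq, (PySem.Int.mod_eq_zero_iff_dvd _ _).2 ⟨u, hu⟩, Or.inl ?_⟩
      exact (hcontains _).2 hb
    · -- t is the large cofactor; witness d = k / t = u
      have hut : u < t := by nlinarith
      have hu2 : 2 ≤ u := by
        rcases (by omega : u = 1 ∨ 2 ≤ u) with rfl | h2
        · omega
        · exact h2
      have hfd : PySem.Int.floordiv k u = t := by
        rw [hu, mul_comm]
        simpa [PySem.Int.floordiv] using Int.mul_fdiv_cancel_left t (by omega : u ≠ 0)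
      refine ⟨u, hu2, by nlinarith, (PySem.Int.mod_eq_zero_iff_dvd _ _).2 ⟨t, by rw [hu]; ring⟩, Or.inr ?_⟩
      rw [hfd]
      exact (hcontains _).2 hb
  · rintro ⟨d, hd2, hdsq, hdmod, hmem⟩
    obtain ⟨u, hu⟩ : d ∣ k := (PySem.Int.mod_eq_zero_iff_dvd _ _).1 hdmod
    have hu0 : 0 < u := by nlinarith
    have hdu : d ≤ u := by nlinarith
    have hfd : PySem.Int.floordiv k d = u := by
      rw [hu]
      simpa [PySem.Int.floordiv] using Int.mul_fdiv_cancel_left u (by omega : d ≠ 0)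
    have hgen : ∀ t : Int, 1 < t → t < k → t ∣ k → (a * t) ∈ numbers →
        ∃ b ∈ numbers,
          decide (a < b ∧ b < m ∧ PySem.Int.mod m b = 0 ∧ PySem.Int.mod b a = 0) = true := by
      intro t ht1 htk htdvd hmem'
      refine ⟨a * t, hmem', ?_⟩
      rw [decide_eq_true_eq]
      refine ⟨by nlinarith, by rw [hm]; nlinarith, ?_, ?_⟩
      · refine (PySem.Int.mod_eq_zero_iff_dvd _ _).2 ?_
        rw [hm]; exact mul_dvd_mul_left a htdvd
      · exact (PySem.Int.mod_eq_zero_iff_dvd _ _).2 ⟨t, rfl⟩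
    rcases hmem with hmem | hmem
    · exact hgen d (by omega) (by nlinarith) ⟨u, hu⟩ ((hcontains _).1 hmem)
    · rw [hfd] at hmem
      exact hgen u (by omega) (by nlinarith) ⟨d, by rw [hu]; ring⟩ ((hcontains _).1 hmem)

theorem pvRange_neg_eq (a b s : Int) (hs : s < 0) :
    PySem.List.pyRange a b s = (PySem.List.pyRange (-a) (-b) (-s)).map (fun x => -x) := by
  have h0 : ¬ s = 0 := by omega
  have h0' : ¬ -s = 0 := by omega
  simp only [PySem.List.pyRange, h0, h0', if_false]
  rw [if_neg (by omega : ¬ (0:Int) < s), if_pos (by omega : (0:Int) < -s)]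
  simp only [List.map_map]
  have h1 : (if -a < -b then ((-b - -a + -s - 1) / -s).toNat else 0)
      = (if b < a then ((a - b + - s - 1) / -s).toNat else 0) := by
    by_cases h : b < a
    · rw [if_pos (by omega), if_pos h]; congr 2; ring
    · rw [if_neg (by omega), if_neg h]
  rw [h1]
  congr 1
  funext k
  simp only [Function.comp]
  ring

theorem pvMem_pyRange_of_neg (a b s x : Int) (hs : s < 0) :
    x ∈ PySem.List.pyRange a b s ↔ x ≤ a ∧ b < x ∧ s ∣ x - a := by
  rw [pvRange_neg_eq a b s hs]
  simp only [List.mem_map]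
  constructor
  · rintro ⟨y, hy, rfl⟩
    rw [PySem.List.mem_pyRange_iff_of_pos (by omega)] at hy
    obtain ⟨h1, h2, d, hd⟩ := hy
    exact ⟨by omega, by omega, ⟨d, by linarith [hd]⟩⟩
  · rintro ⟨h1, h2, d, hd⟩
    refine ⟨-x, ?_, by ring⟩
    rw [PySem.List.mem_pyRange_iff_of_pos (by omega)]
    exact ⟨by omega, by omega, ⟨d, by linarith [hd]⟩⟩

theorem pvFoldl_id {α β : Type} (l : List α) (f : β → α → β) (init : β)
    (h : ∀ x ∈ l, ∀ acc, f acc x = acc) : l.foldl f init = init := by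
  induction l generalizing init with
  | nil => rfl
  | cons x rest ih =>
      rw [List.foldl_cons, h x (by simp) init]
      exact ih init (fun y hy acc => h y (by simp [hy]) acc)

theorem pvFoldl_enumerate {α β : Type} (xs : List α) (f : β → α → β) (init : β) :
    (PySem.List.enumerate xs 0).foldl (fun acc p => f acc p.2) init = xs.foldl f init := by
  conv_rhs => rw [← PySem.List.map_snd_enumerate xs 0]
  rw [List.foldl_map]

-- ===== VERDICT (by name: the statement is the Claim_ definition above) =====
theorem compute_direct_edges_optimized_spec : Claim_equal_compute_direct_edges_optimized := by
  intro numbers _ hpre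
  unfold Spec_compute_direct_edges_optimized
  by_cases hnil : numbers = []
  · subst hnil; rfl
  · simp only [compute_direct_edges_optimized, compute_direct_edges_optimized_alt, if_neg hnil]
    rw [pvFoldl_enumerate numbers
      (f := fun edges a =>
        (PySem.List.pyRange (2 * a) ((PySem.List.pyGet? numbers (-1)).getD 0 + 1) a).foldl
          (fun edges multiple =>
            if (PySem.Set.ofList numbers).contains multiple then
              if pvIsDirectA a multiple numbers then edges ++ [(a, multiple)] else edges
            else edges) edges)]
    apply PySem.List.foldl_congr_mem
    intro acc a hmem
    obtain ⟨h0, hneg⟩ := hpre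
    have ha0 : a ≠ 0 := fun h => h0 (h ▸ hmem)
    rcases lt_or_gt_of_ne ha0 with haneg | ha
    · -- a < 0: the descending range reaches no element of the set (Pre_), so both
      -- inner folds leave the accumulator unchanged
      rw [pvFoldl_id _ _ _ ?h1, pvFoldl_id _ _ _ ?h2]
      case h1 =>
        intro m hmR acc'
        rw [pvMem_pyRange_of_neg _ _ _ _ haneg] at hmR
        obtain ⟨hm1, hm2, t, htt⟩ := hmR
        have hmn : m ∉ numbers := fun hmn =>
          hneg a hmem haneg m hmn ⟨hm1, hm2, ⟨t + 2, by linarith⟩⟩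
        simp [PySem.Set.contains, PySem.Set.mem_ofList, hmn]
      case h2 =>
        intro m hmR acc'
        rw [pvMem_pyRange_of_neg _ _ _ _ haneg] at hmR
        obtain ⟨hm1, hm2, t, htt⟩ := hmR
        have hmn : m ∉ numbers := fun hmn =>
          hneg a hmem haneg m hmn ⟨hm1, hm2, ⟨t + 2, by linarith⟩⟩
        simp [PySem.Set.contains, PySem.Set.mem_ofList, hmn]
    · apply PySem.List.foldl_congr_mem
      intro acc' m hmR
      rw [PySem.List.mem_pyRange_iff_of_pos ha] at hmR
      obtain ⟨h1, h2, t, ht⟩ := hmR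
      have hmod : PySem.Int.mod m a = 0 :=
        (PySem.Int.mod_eq_zero_iff_dvd _ _).2 ⟨t + 2, by linarith⟩
      have hk2 : 2 ≤ PySem.Int.floordiv m a := by
        have hmeq : m = a * (t + 2) := by linarith
        have : PySem.Int.floordiv m a = t + 2 := by
          rw [hmeq]
          simpa [PySem.Int.floordiv] using Int.mul_fdiv_cancel_left (t + 2) (by omega : a ≠ 0)
        have ht0 : 0 ≤ t := by nlinarith
        omega
      rw [pvBlock numbers a m ha hmod hk2]
      cases h : pvHasPPD a (PySem.Int.floordiv m a) (PySem.Set.ofList numbers) 2 <;> simp
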